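-- pv_equiv track=rewrite | github.com/iolkhovsky/interviews | arriver/problem3.py | estimate_size
-- ===== SOURCE A (Python) =====
-- def estimate_size(pixels):
--     start, stop = None, None
--     size = len(pixels)
--     for idx, pixel in enumerate(pixels):
--         if idx and sum(pixel) > 0. and sum(pixels[idx - 1]) == 0.:
--             start = idx
--         if idx < size - 1 and sum(pixel) > 0. and sum(pixels[idx + 1]) == 0.:
--             stop = idx
--     return stop - start + 1
-- ===== SOURCE B (Python) =====
-- def estimate_size(pixels):
--     # Run-length encode the rows by the sign category of their pixel sum
--     # (1: positive, 0: zero, -1: negative), then read start/stop off the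
--     # adjacent run pairs: a zero-run followed by a positive-run is a rising
--     # edge, a positive-run followed by a zero-run is a falling edge.
--     runs = []  # [category, first_row, last_row]
--     for idx, pixel in enumerate(pixels):
--         s = sum(pixel)
--         cat = 1 if s > 0 else (0 if s == 0 else -1)
--         if runs and runs[-1][0] == cat:
--             runs[-1][2] = idx
--         else:
--             runs.append([cat, idx, idx])
--     start, stop = None, None
--     for prev, cur in zip(runs, runs[1:]):
--         if prev[0] == 0 and cur[0] == 1:
--             start = cur[1]
--         if prev[0] == 1 and cur[0] == 0:
--             stop = prev[2]
--     return stop - start + 1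
-- ===== Notes on version B (the rewrite author's own statement) =====
-- stated objective: alternative
-- what changed: A's single forward scan that re-reads the neighbouring rows' sums at every index is replaced by a run-length encoding of the rows by the sign category of their sum, with start/stop read off adjacent run pairs (zero-run followed by positive-run = rising edge, positive-run followed by zero-run = falling edge).
import Mathlib
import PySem

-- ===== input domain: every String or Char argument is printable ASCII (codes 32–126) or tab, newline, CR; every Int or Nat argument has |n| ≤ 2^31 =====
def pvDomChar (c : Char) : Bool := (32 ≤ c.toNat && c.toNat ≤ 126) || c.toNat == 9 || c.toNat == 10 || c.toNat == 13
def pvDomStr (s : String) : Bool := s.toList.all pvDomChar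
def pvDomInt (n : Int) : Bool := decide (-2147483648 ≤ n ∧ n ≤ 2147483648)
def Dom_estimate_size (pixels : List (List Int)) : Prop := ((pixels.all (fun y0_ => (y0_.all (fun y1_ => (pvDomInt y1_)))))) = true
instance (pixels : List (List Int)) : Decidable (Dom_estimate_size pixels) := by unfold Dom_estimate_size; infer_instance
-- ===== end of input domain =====

-- B replaces A's per-index forward scan (which re-reads neighbouring rows) by a
-- run-length encoding of the rows' sum sign, reading start/stop off adjacent run
-- pairs (objective: alternative decomposition, same asymptotic cost).

-- ===== PORT A =====
-- condition of A's first if: `idx and sum(pixel) > 0. and sum(pixels[idx-1]) == 0.`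
-- (pixels[idx-1] is only reached with 1 ≤ idx < len, so pyGetD with default [] is exact there)
def pvC1 (pixels : List (List Int)) (p : Int × List Int) : Bool :=
  decide (p.1 ≠ 0) && decide (0 < p.2.sum) && decide ((PySem.List.pyGetD pixels (p.1 - 1) []).sum = 0)

-- condition of A's second if: `idx < size - 1 and sum(pixel) > 0. and sum(pixels[idx+1]) == 0.`
def pvC2 (pixels : List (List Int)) (size : Int) (p : Int × List Int) : Bool :=
  decide (p.1 < size - 1) && decide (0 < p.2.sum) && decide ((PySem.List.pyGetD pixels (p.1 + 1) []).sum = 0)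

-- A's loop body: overwrite start / stop when the respective condition fires
def pvStepA (pixels : List (List Int)) (size : Int)
    (s : Option Int × Option Int) (p : Int × List Int) : Option Int × Option Int :=
  let s1 := if pvC1 pixels p then (some p.1, s.2) else s
  if pvC2 pixels size p then (s1.1, some p.1) else s1

def estimate_size (pixels : List (List Int)) : Int :=
  let size : Int := (pixels.length : Int)
  let st := (PySem.List.enumerate pixels).foldl (pvStepA pixels size) (none, none)
  match st.1, st.2 with
  | some a, some b => b - a + 1
  | _, _ => 0   -- Python raises TypeError here (start or stop is None); excluded by Pre_

-- ===== PORT B =====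
-- `1 if s > 0 else (0 if s == 0 else -1)`
def pvCat (s : Int) : Int := if 0 < s then 1 else if s = 0 then 0 else -1

-- B's first loop body: extend the last run or open a new one
def pvStepRun (runs : List (Int × Int × Int)) (p : Int × List Int) : List (Int × Int × Int) :=
  let cat := pvCat p.2.sum
  match runs.getLast? with
  | some r => if r.1 = cat then runs.dropLast ++ [(r.1, r.2.1, p.1)] else runs ++ [(cat, p.1, p.1)]
  | none => [(cat, p.1, p.1)]

-- `prev[0] == 0 and cur[0] == 1` (rising edge between adjacent runs)
def pvQ1 (pc : (Int × Int × Int) × (Int × Int × Int)) : Bool :=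
  decide (pc.1.1 = 0) && decide (pc.2.1 = 1)

-- `prev[0] == 1 and cur[0] == 0` (falling edge between adjacent runs)
def pvQ2 (pc : (Int × Int × Int) × (Int × Int × Int)) : Bool :=
  decide (pc.1.1 = 1) && decide (pc.2.1 = 0)

-- B's second loop body over `zip(runs, runs[1:])`
def pvStepSel (s : Option Int × Option Int)
    (pc : (Int × Int × Int) × (Int × Int × Int)) : Option Int × Option Int :=
  let s1 := if pvQ1 pc then (some pc.2.2.1, s.2) else s
  if pvQ2 pc then (s1.1, some pc.1.2.2) else s1

def estimate_size_alt (pixels : List (List Int)) : Int :=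
  let runs := (PySem.List.enumerate pixels).foldl pvStepRun []
  let st := (runs.zip (runs.drop 1)).foldl pvStepSel (none, none)
  match st.1 with
  | none => 0   -- Python raises TypeError here (start is None); excluded by Pre_
  | some a =>
    match st.2 with
    | none => 0   -- Python raises TypeError here (stop is None); excluded by Pre_
    | some b => b - a + 1

-- ===== PRECONDITION & SPEC =====
-- Pre_ : exactly the inputs where both a rising edge (start) and a falling edge (stop)
-- exist; on all other inputs Python A (and B) raises TypeError (None arithmetic).
def Pre_estimate_size (pixels : List (List Int)) : Prop :=
  (∃ i ∈ PySem.List.pyRange 1 (pixels.length : Int),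
      0 < PySem.List.pyGetD (pixels.map List.sum) i 0 ∧
      PySem.List.pyGetD (pixels.map List.sum) (i - 1) 0 = 0) ∧
  (∃ i ∈ PySem.List.pyRange 0 ((pixels.length : Int) - 1),
      0 < PySem.List.pyGetD (pixels.map List.sum) i 0 ∧
      PySem.List.pyGetD (pixels.map List.sum) (i + 1) 0 = 0)

instance (pixels : List (List Int)) : Decidable (Pre_estimate_size pixels) := by
  unfold Pre_estimate_size; infer_instance

def pvWitness_estimate_size : List (List Int) := [[0], [1], [0]]

def Spec_estimate_size (pixels : List (List Int)) (out : Int) : Prop := out = estimate_size_alt pixels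
instance (pixels : List (List Int)) (out : Int) : Decidable (Spec_estimate_size pixels out) := by unfold Spec_estimate_size; infer_instance

-- ===== CLAIM (what is proved, stated in full; the proofs are below) =====
def Claim_equal_estimate_size : Prop := ∀ (pixels : List (List Int)), Dom_estimate_size pixels → Pre_estimate_size pixels → Spec_estimate_size pixels (estimate_size pixels)

-- ===== LEMMAS AND PROOFS =====

-- an overwriting fold of a pair of "last match" searches splits into two find?s on the reverse
theorem pv_foldPair {α : Type} (p q : α → Bool) (f g : α → Int) :
    ∀ (l : List α) (x y : Option Int),
      l.foldl (fun s a =>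
        let s1 := if p a then (some (f a), s.2) else s
        if q a then (s1.1, some (g a)) else s1) (x, y)
      = ((l.reverse.find? p).elim x (fun a => some (f a)),
         (l.reverse.find? q).elim y (fun a => some (g a))) := by
  intro l
  induction l with
  | nil => intro x y; simp
  | cons a t ih =>
    intro x y
    have hstep : (let s1 := if p a then (some (f a), (x, y).2) else (x, y)
        if q a then (s1.1, some (g a)) else s1)
        = ((if p a then some (f a) else x), (if q a then some (g a) else y)) := by
      by_cases h1 : p a <;> by_cases h2 : q a <;> simp [h1, h2]
    rw [List.foldl_cons, hstep, ih, List.reverse_cons, List.find?_append, List.find?_append]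
    cases hf1 : t.reverse.find? p <;>
      cases hf2 : t.reverse.find? q <;>
        by_cases h1 : p a <;> by_cases h2 : q a <;>
          simp [List.find?, h1, h2]

theorem pv_foldA (pixels : List (List Int)) (size : Int) (l : List (Int × List Int))
    (x y : Option Int) :
    l.foldl (pvStepA pixels size) (x, y)
      = ((l.reverse.find? (pvC1 pixels)).elim x (fun a => some a.1),
         (l.reverse.find? (pvC2 pixels size)).elim y (fun a => some a.1)) :=
  pv_foldPair (pvC1 pixels) (pvC2 pixels size) (fun a => a.1) (fun a => a.1) l x y

theorem pv_foldB (l : List ((Int × Int × Int) × (Int × Int × Int))) (x y : Option Int) :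
    l.foldl pvStepSel (x, y)
      = ((l.reverse.find? pvQ1).elim x (fun pc => some pc.2.2.1),
         (l.reverse.find? pvQ2).elim y (fun pc => some pc.1.2.2)) :=
  pv_foldPair pvQ1 pvQ2 (fun pc => pc.2.2.1) (fun pc => pc.1.2.2) l x y

theorem pv_find?_congr {α : Type} (p q : α → Bool) :
    ∀ (l : List α), (∀ x ∈ l, p x = q x) → l.find? p = l.find? q := by
  intro l
  induction l with
  | nil => intro _; rfl
  | cons a t ih =>
    intro h
    have ha := h a (by simp)
    by_cases hp : p a = true
    · simp [List.find?, hp, ha ▸ hp]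
    · have hq : q a = false := by rw [← ha]; simpa using hp
      simp only [List.find?, Bool.not_eq_true] at *
      rw [hp, hq]
      exact ih (fun x hx => h x (by simp [hx]))

-- adjacent pairs of a list, as produced by zip(l, l[1:])
def pvAdj {α : Type} : List α → List (α × α)
  | [] => []
  | [_] => []
  | a :: b :: t => (a, b) :: pvAdj (b :: t)

theorem pv_zip_eq_adj {α : Type} (l : List α) : l.zip (l.drop 1) = pvAdj l := by
  induction l with
  | nil => rfl
  | cons a t ih =>
    cases t with
    | nil => rfl
    | cons b t' =>
      simp only [List.drop_succ_cons, List.drop_zero, List.zip_cons_cons, pvAdj]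
      rw [← ih]
      simp

theorem pv_adj_concat {α : Type} :
    ∀ (l : List α) (s r : α), l.getLast? = some r → pvAdj (l ++ [s]) = pvAdj l ++ [(r, s)] := by
  intro l
  induction l with
  | nil => intro s r h; simp at h
  | cons a t ih =>
    intro s r h
    cases t with
    | nil =>
      simp only [List.getLast?_singleton, Option.some.injEq] at h
      subst h
      rfl
    | cons b t' =>
      have h' : (b :: t').getLast? = some r := by
        rw [List.getLast?_cons_cons] at h; exact h
      simp only [List.cons_append, pvAdj]
      rw [show b :: (t' ++ [s]) = (b :: t') ++ [s] from rfl, ih s r h']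

theorem pvCat_eq_one (t : Int) : pvCat t = 1 ↔ 0 < t := by
  unfold pvCat; split_ifs <;> simp_all

theorem pvCat_eq_zero (t : Int) : pvCat t = 0 ↔ t = 0 := by
  unfold pvCat; split_ifs <;> simp_all <;> omega

theorem pv_getD_snoc_left (ys : List (List Int)) (y : List Int) (k : Nat) (hk : k < ys.length) :
    PySem.List.pyGetD (ys ++ [y]) (k : Int) [] = PySem.List.pyGetD ys (k : Int) [] := by
  rw [PySem.List.pyGetD_natCast, PySem.List.pyGetD_natCast]
  unfold List.getD
  rw [List.getElem?_append_left hk]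

theorem pv_getD_snoc_last (ys : List (List Int)) (y : List Int) :
    PySem.List.pyGetD (ys ++ [y]) (ys.length : Int) [] = y := by
  rw [PySem.List.pyGetD_natCast]
  simp [List.getD]

-- appending a row changes neither value of A's first condition on the old indices
theorem pv_congr1 (ys : List (List Int)) (y : List Int) :
    ∀ p ∈ (PySem.List.enumerate ys).reverse, pvC1 (ys ++ [y]) p = pvC1 ys p := by
  intro p hp
  rw [List.mem_reverse, PySem.List.mem_enumerate_iff] at hp
  obtain ⟨k, hk, rfl⟩ := hp
  simp only [zero_add]
  by_cases hk0 : k = 0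
  · subst hk0; simp [pvC1]
  · unfold pvC1
    have h1 : ((k : Nat) : Int) - 1 = (((k - 1 : Nat) : Nat) : Int) := by omega
    rw [h1, pv_getD_snoc_left ys y (k - 1) (by omega)]

-- appending a row changes neither value of A's second condition on the indices of zs
theorem pv_congr2 (zs : List (List Int)) (z y : List Int) :
    ∀ p ∈ (PySem.List.enumerate zs).reverse,
      pvC2 ((zs ++ [z]) ++ [y]) ((zs.length : Int) + 2) p
        = pvC2 (zs ++ [z]) ((zs.length : Int) + 1) p := by
  intro p hp
  rw [List.mem_reverse, PySem.List.mem_enumerate_iff] at hp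
  obtain ⟨k, hk, rfl⟩ := hp
  simp only [zero_add]
  unfold pvC2
  have ht1 : decide (((k : Nat) : Int) < (zs.length : Int) + 2 - 1) = true := by
    simp only [decide_eq_true_eq]; omega
  have ht2 : decide (((k : Nat) : Int) < (zs.length : Int) + 1 - 1) = true := by
    simp only [decide_eq_true_eq]; omega
  rw [ht1, ht2]
  have h1 : ((k : Nat) : Int) + 1 = (((k + 1 : Nat) : Nat) : Int) := by omega
  rw [h1, pv_getD_snoc_left (zs ++ [z]) y (k + 1) (by simp; omega)]

-- the master invariant, by right-append induction
theorem pv_master (pixels : List (List Int)) :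
    (pixels = [] → (PySem.List.enumerate pixels).foldl pvStepRun [] = []) ∧
    (∀ ys y, pixels = ys ++ [y] →
       ∃ init r, (PySem.List.enumerate pixels).foldl pvStepRun [] = init ++ [r] ∧
         r.1 = pvCat y.sum ∧ r.2.2 = (pixels.length : Int) - 1) ∧
    ((pvAdj ((PySem.List.enumerate pixels).foldl pvStepRun [])).reverse.find? pvQ1).elim none
        (fun pc => some pc.2.2.1)
      = ((PySem.List.enumerate pixels).reverse.find? (pvC1 pixels)).elim none (fun a => some a.1) ∧
    ((pvAdj ((PySem.List.enumerate pixels).foldl pvStepRun [])).reverse.find? pvQ2).elim none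
        (fun pc => some pc.1.2.2)
      = ((PySem.List.enumerate pixels).reverse.find? (pvC2 pixels (pixels.length : Int))).elim none
          (fun a => some a.1) := by
  induction pixels using List.reverseRecOn with
  | nil =>
    refine ⟨fun _ => rfl, ?_, rfl, rfl⟩
    intro ys y h
    exact absurd h (by simp)
  | append_singleton ys y ih =>
    have henum : PySem.List.enumerate (ys ++ [y]) 0
        = PySem.List.enumerate ys 0 ++ [((ys.length : Int), y)] := by
      rw [PySem.List.enumerate_append, PySem.List.enumerate_cons, PySem.List.enumerate_nil]
      norm_num
    have hfold : (PySem.List.enumerate (ys ++ [y]) 0).foldl pvStepRun []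
        = pvStepRun ((PySem.List.enumerate ys 0).foldl pvStepRun []) (((ys.length : Int)), y) := by
      rw [henum, List.foldl_append]
      rfl
    rcases List.eq_nil_or_concat ys with rfl | ⟨zs, z, hzs⟩
    · -- first row: a single fresh run, no adjacent pair, no valid index on A's side
      refine ⟨fun h => absurd h (by simp), ?_, ?_, ?_⟩
      · intro ys' y' h
        obtain ⟨h1, h2⟩ := List.append_inj' (show ys' ++ [y'] = [] ++ [y] by simpa using h.symm) rfl
        subst h1
        simp only [List.cons.injEq] at h2
        refine ⟨[], (pvCat y.sum, 0, 0), ?_, by rw [h2.1], by norm_num⟩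
        rw [hfold]
        rfl
      · rw [hfold]
        show ((pvAdj [(pvCat y.sum, 0, 0)]).reverse.find? pvQ1).elim none _ = _
        simp [pvAdj, pvC1, PySem.List.enumerate_cons, PySem.List.enumerate_nil]
      · rw [hfold]
        show ((pvAdj [(pvCat y.sum, 0, 0)]).reverse.find? pvQ2).elim none _ = _
        simp [pvAdj, pvC2, PySem.List.enumerate_cons, PySem.List.enumerate_nil]
    · rw [List.concat_eq_append] at hzs
      subst hzs
      obtain ⟨-, ih2, ih3, ih4⟩ := ih
      obtain ⟨init, r, hruns, hr1, hr2⟩ := ih2 zs z rfl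
      rw [hruns] at ih3 ih4
      have hr2' : r.2.2 = (zs.length : Int) := by rw [hr2]; simp
      have hlast : (init ++ [r]).getLast? = some r := List.getLast?_concat
      have henum2 : PySem.List.enumerate (zs ++ [z]) 0
          = PySem.List.enumerate zs 0 ++ [((zs.length : Int), z)] := by
        rw [PySem.List.enumerate_append, PySem.List.enumerate_cons, PySem.List.enumerate_nil]
        norm_num
      have hrev : (PySem.List.enumerate ((zs ++ [z]) ++ [y]) 0).reverse
          = ((((zs ++ [z]).length : Int)), y) :: (PySem.List.enumerate (zs ++ [z]) 0).reverse := by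
        rw [henum]; simp
      have hrev2 : (PySem.List.enumerate (zs ++ [z]) 0).reverse
          = (((zs.length : Int)), z) :: (PySem.List.enumerate zs 0).reverse := by
        rw [henum2]; simp
      have hstep : (PySem.List.enumerate ((zs ++ [z]) ++ [y]) 0).foldl pvStepRun []
          = if r.1 = pvCat y.sum
            then init ++ [(r.1, r.2.1, (((zs ++ [z]).length : Int)))]
            else (init ++ [r]) ++ [(pvCat y.sum, (((zs ++ [z]).length : Int)), (((zs ++ [z]).length : Int)))] := by
        rw [hfold, hruns]
        unfold pvStepRun
        rw [hlast]
        simp only [List.dropLast_concat]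
      -- head evaluations on A's side
      have hm1 : (((zs ++ [z]).length : Int)) - 1 = (zs.length : Int) := by simp
      have hC1y : pvC1 ((zs ++ [z]) ++ [y]) ((((zs ++ [z]).length : Int)), y)
          = (decide (0 < y.sum) && decide (z.sum = 0)) := by
        unfold pvC1
        have hne : decide ((((zs ++ [z]).length : Int)) ≠ 0) = true := by
          simp only [decide_eq_true_eq]; simp; omega
        rw [hne, Bool.true_and, hm1, pv_getD_snoc_left (zs ++ [z]) y zs.length (by simp),
            pv_getD_snoc_last]
      have hszlen : ((((zs ++ [z]) ++ [y]).length : Nat) : Int) = (zs.length : Int) + 2 := by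
        simp
      have hszlen2 : ((((zs ++ [z]).length : Nat) : Int)) = (zs.length : Int) + 1 := by simp
      have hC2y : pvC2 ((zs ++ [z]) ++ [y]) ((zs.length : Int) + 2) ((((zs ++ [z]).length : Int)), y)
          = false := by
        unfold pvC2
        have : decide ((((zs ++ [z]).length : Int)) < (zs.length : Int) + 2 - 1) = false := by
          simp only [decide_eq_false_iff_not, List.length_append, List.length_cons,
            List.length_nil]
          push_cast
          omega
        rw [this]
        simp
      have hC2z : pvC2 ((zs ++ [z]) ++ [y]) ((zs.length : Int) + 2) (((zs.length : Int)), z)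
          = (decide (0 < z.sum) && decide (y.sum = 0)) := by
        unfold pvC2
        have h1 : decide ((zs.length : Int) < (zs.length : Int) + 2 - 1) = true := by
          simp only [decide_eq_true_eq]; omega
        rw [h1, Bool.true_and]
        have h2 : (zs.length : Int) + 1 = (((zs ++ [z]).length : Nat) : Int) := by simp
        rw [h2, pv_getD_snoc_last]
      have hC2zOld : pvC2 (zs ++ [z]) ((zs.length : Int) + 1) (((zs.length : Int)), z) = false := by
        unfold pvC2
        have : decide ((zs.length : Int) < (zs.length : Int) + 1 - 1) = false := by
          simp only [decide_eq_false_iff_not]; omega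
        rw [this]
        simp
      have hfc1 : (PySem.List.enumerate (zs ++ [z]) 0).reverse.find? (pvC1 ((zs ++ [z]) ++ [y]))
          = (PySem.List.enumerate (zs ++ [z]) 0).reverse.find? (pvC1 (zs ++ [z])) :=
        pv_find?_congr _ _ _ (pv_congr1 (zs ++ [z]) y)
      have hfc2 : (PySem.List.enumerate zs 0).reverse.find? (pvC2 ((zs ++ [z]) ++ [y]) ((zs.length : Int) + 2))
          = (PySem.List.enumerate zs 0).reverse.find? (pvC2 (zs ++ [z]) ((zs.length : Int) + 1)) :=
        pv_find?_congr _ _ _ (pv_congr2 zs z y)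
      refine ⟨fun h => absurd h (by simp), ?_, ?_, ?_⟩
      · -- shape of the run list after one more row
        intro ys' y' h
        obtain ⟨h1, h2⟩ := List.append_inj' h rfl
        subst h1
        simp only [List.cons.injEq] at h2
        rw [hstep]
        by_cases hcat : r.1 = pvCat y.sum
        · rw [if_pos hcat]
          exact ⟨init, _, rfl, by rw [← h2.1, hcat], by rw [hszlen]; push_cast; simp; omega⟩
        · rw [if_neg hcat]
          exact ⟨init ++ [r], _, rfl, by rw [h2.1], by rw [hszlen]; push_cast; simp; omega⟩
      · -- the rising-edge (start) search
        rw [hstep, hrev]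
        by_cases hcat : r.1 = pvCat y.sum
        · rw [if_pos hcat]
          have hheadA : pvC1 ((zs ++ [z]) ++ [y]) ((((zs ++ [z]).length : Int)), y) = false := by
            rw [hC1y]
            have : ¬ (0 < y.sum ∧ z.sum = 0) := by
              rintro ⟨hy, hz⟩
              have h1 : pvCat y.sum = 1 := (pvCat_eq_one _).mpr hy
              have h0 : pvCat z.sum = 0 := (pvCat_eq_zero _).mpr hz
              rw [h1] at hcat
              rw [← hr1, hcat] at h0
              norm_num at h0
            simp only [Bool.and_eq_false_iff, decide_eq_false_iff_not]
            by_cases hy : 0 < y.sum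
            · exact Or.inr (fun hz => this ⟨hy, hz⟩)
            · exact Or.inl hy
          rw [List.find?_cons_of_neg (by rw [hheadA]; simp), hfc1, ← ih3]
          -- B's pair list is unchanged up to the defining fields
          rcases List.eq_nil_or_concat init with rfl | ⟨i2, q, hinit⟩
          · rfl
          · rw [List.concat_eq_append] at hinit
            subst hinit
            rw [pv_adj_concat _ _ _ List.getLast?_concat,
                pv_adj_concat _ _ _ List.getLast?_concat]
            simp only [List.reverse_append, List.reverse_cons, List.reverse_nil,
              List.nil_append, List.singleton_append]
            cases hq : pvQ1 (q, r) with
            | true =>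
              rw [List.find?_cons_of_pos hq, List.find?_cons_of_pos (show pvQ1 (q, (r.1, r.2.1, (((zs ++ [z]).length : Int)))) = true from hq)]
              rfl
            | false =>
              have hq' : ¬ pvQ1 (q, r) = true := by rw [hq]; simp
              rw [List.find?_cons_of_neg (show ¬ pvQ1 (q, (r.1, r.2.1, (((zs ++ [z]).length : Int)))) = true from hq'),
                  List.find?_cons_of_neg hq']
        · rw [if_neg hcat]
          rw [pv_adj_concat _ _ _ hlast]
          simp only [List.reverse_append, List.reverse_cons, List.reverse_nil,
            List.nil_append, List.singleton_append]
          have hQ1head : pvQ1 (r, (pvCat y.sum, (((zs ++ [z]).length : Int)), (((zs ++ [z]).length : Int))))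
              = (decide (z.sum = 0) && decide (0 < y.sum)) := by
            unfold pvQ1
            have e1 : decide (r.1 = 0) = decide (z.sum = 0) := by
              rw [hr1]; exact decide_eq_decide.mpr (pvCat_eq_zero _)
            have e2 : decide (pvCat y.sum = 1) = decide (0 < y.sum) :=
              decide_eq_decide.mpr (pvCat_eq_one _)
            rw [show (r, (pvCat y.sum, (((zs ++ [z]).length : Int)), (((zs ++ [z]).length : Int)))).1.1 = r.1 from rfl] at *
            rw [e1, e2]
          by_cases hedge : 0 < y.sum ∧ z.sum = 0
          · rw [List.find?_cons_of_pos (by rw [hQ1head]; simp [hedge.1, hedge.2]),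
                List.find?_cons_of_pos (by rw [hC1y]; simp [hedge.1, hedge.2])]
            simp
          · rw [List.find?_cons_of_neg (by
                rw [hQ1head]; simp only [Bool.and_eq_true, decide_eq_true_eq]
                rintro ⟨hz, hy⟩; exact hedge ⟨hy, hz⟩),
              List.find?_cons_of_neg (by
                rw [hC1y]; simp only [Bool.and_eq_true, decide_eq_true_eq]
                rintro ⟨hy, hz⟩; exact hedge ⟨hy, hz⟩)]
            rw [hfc1, ← ih3]
      · -- the falling-edge (stop) search
        rw [hstep, hrev, hszlen, List.find?_cons_of_neg (by rw [hC2y]; simp), hrev2]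
        have ihstop : ((pvAdj (init ++ [r])).reverse.find? pvQ2).elim none (fun pc => some pc.1.2.2)
            = ((PySem.List.enumerate zs 0).reverse.find? (pvC2 (zs ++ [z]) ((zs.length : Int) + 1))).elim
                none (fun a => some a.1) := by
          rw [ih4, hszlen2, hrev2, List.find?_cons_of_neg (by rw [hC2zOld]; simp)]
        by_cases hcat : r.1 = pvCat y.sum
        · rw [if_pos hcat]
          have hheadz : pvC2 ((zs ++ [z]) ++ [y]) ((zs.length : Int) + 2) (((zs.length : Int)), z)
              = false := by
            rw [hC2z]
            have : ¬ (0 < z.sum ∧ y.sum = 0) := by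
              rintro ⟨hz, hy⟩
              have h1 : pvCat z.sum = 1 := (pvCat_eq_one _).mpr hz
              have h0 : pvCat y.sum = 0 := (pvCat_eq_zero _).mpr hy
              rw [h1] at hr1
              rw [hr1] at hcat
              rw [← hcat] at h0
              norm_num at h0
            simp only [Bool.and_eq_false_iff, decide_eq_false_iff_not]
            by_cases hz : 0 < z.sum
            · exact Or.inr (fun hy => this ⟨hz, hy⟩)
            · exact Or.inl hz
          rw [List.find?_cons_of_neg (by rw [hheadz]; simp), hfc2, ← ihstop]
          rcases List.eq_nil_or_concat init with rfl | ⟨i2, q, hinit⟩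
          · rfl
          · rw [List.concat_eq_append] at hinit
            subst hinit
            rw [pv_adj_concat _ _ _ List.getLast?_concat,
                pv_adj_concat _ _ _ List.getLast?_concat]
            simp only [List.reverse_append, List.reverse_cons, List.reverse_nil,
              List.nil_append, List.singleton_append]
            cases hq : pvQ2 (q, r) with
            | true =>
              rw [List.find?_cons_of_pos hq, List.find?_cons_of_pos (show pvQ2 (q, (r.1, r.2.1, (((zs ++ [z]).length : Int)))) = true from hq)]
              rfl
            | false =>
              have hq' : ¬ pvQ2 (q, r) = true := by rw [hq]; simp
              rw [List.find?_cons_of_neg (show ¬ pvQ2 (q, (r.1, r.2.1, (((zs ++ [z]).length : Int)))) = true from hq'),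
                  List.find?_cons_of_neg hq']
        · rw [if_neg hcat]
          rw [pv_adj_concat _ _ _ hlast]
          simp only [List.reverse_append, List.reverse_cons, List.reverse_nil,
            List.nil_append, List.singleton_append]
          have hQ2head : pvQ2 (r, (pvCat y.sum, (((zs ++ [z]).length : Int)), (((zs ++ [z]).length : Int))))
              = (decide (0 < z.sum) && decide (y.sum = 0)) := by
            unfold pvQ2
            have e1 : decide (r.1 = 1) = decide (0 < z.sum) := by
              rw [hr1]; exact decide_eq_decide.mpr (pvCat_eq_one _)
            have e2 : decide (pvCat y.sum = 0) = decide (y.sum = 0) :=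
              decide_eq_decide.mpr (pvCat_eq_zero _)
            rw [e1, e2]
          by_cases hedge : 0 < z.sum ∧ y.sum = 0
          · rw [List.find?_cons_of_pos (by rw [hQ2head]; simp [hedge.1, hedge.2]),
                List.find?_cons_of_pos (by rw [hC2z]; simp [hedge.1, hedge.2])]
            simp [hr2']
          · rw [List.find?_cons_of_neg (by
                rw [hQ2head]; simp only [Bool.and_eq_true, decide_eq_true_eq]
                exact hedge),
              List.find?_cons_of_neg (by
                rw [hC2z]; simp only [Bool.and_eq_true, decide_eq_true_eq]
                exact hedge)]
            rw [hfc2, ← ihstop]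

-- ===== VERDICT (by name: the statement is the Claim_ definition above) =====
theorem estimate_size_spec : Claim_equal_estimate_size := by
  intro pixels _ _
  unfold Spec_estimate_size
  obtain ⟨-, -, h3, h4⟩ := pv_master pixels
  simp only [estimate_size, estimate_size_alt]
  rw [pv_foldA, pv_foldB, pv_zip_eq_adj, h3, h4]
  cases (List.find? (pvC1 pixels) (PySem.List.enumerate pixels).reverse).elim none
      (fun a => some a.1) <;>
    cases (List.find? (pvC2 pixels ((pixels.length : Int))) (PySem.List.enumerate pixels).reverse).elim
        none (fun a => some a.1) <;> rfl
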